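-- pv_equiv track=rewrite | github.com/gabeorlanski/scb-problems | inject_canary.py | _is_under_test_data_subtree
-- ===== SOURCE A (Python) =====
-- TEST_DATA_DIRECTORIES = frozenset(
--     {
--         "data",
--         "assets",
--     }
-- )
--
-- def _is_under_test_data_subtree(parts: tuple[str, ...]) -> bool:
--     """Return True when the path is inside tests/data or tests/assets."""
--     for index, part in enumerate(parts):
--         if part != "tests":
--             continue
--         for inner in parts[index + 1 :]:
--             if inner in TEST_DATA_DIRECTORIES:
--                 return True
--     return False
-- ===== SOURCE B (Python) =====
-- TEST_DATA_DIRECTORIES = frozenset({"data", "assets"})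
--
-- def _is_under_test_data_subtree(parts):
--     """Single pass: remember whether 'tests' was seen, then any data/assets hit returns True."""
--     seen_tests = False
--     for part in parts:
--         if seen_tests and part in TEST_DATA_DIRECTORIES:
--             return True
--         seen_tests = seen_tests or part == "tests"
--     return False
-- ===== Notes on version B (the rewrite author's own statement) =====
-- stated objective: simpler
-- what changed: replaced the nested loops (for every 'tests' occurrence a rescan of the whole suffix) by one pass carrying a seen-'tests' boolean flag
import Mathlib
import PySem

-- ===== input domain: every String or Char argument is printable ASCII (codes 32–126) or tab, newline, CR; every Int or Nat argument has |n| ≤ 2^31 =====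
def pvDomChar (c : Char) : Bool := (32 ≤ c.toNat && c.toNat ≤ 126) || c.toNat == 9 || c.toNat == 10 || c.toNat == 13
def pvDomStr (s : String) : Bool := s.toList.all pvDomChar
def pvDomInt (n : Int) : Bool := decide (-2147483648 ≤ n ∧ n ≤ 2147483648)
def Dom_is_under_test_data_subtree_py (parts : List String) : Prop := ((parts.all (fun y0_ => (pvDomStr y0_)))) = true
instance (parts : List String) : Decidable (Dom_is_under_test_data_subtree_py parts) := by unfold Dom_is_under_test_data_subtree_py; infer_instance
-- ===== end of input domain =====

-- ===== PORT A =====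
-- inner loop: `for inner in parts[index+1:]: if inner in TEST_DATA_DIRECTORIES: return True`
def pvInnerScan : List String → Bool
  | [] => false
  | x :: xs => if x == "data" || x == "assets" then true else pvInnerScan xs

-- outer loop over enumerate(parts); parts[index+1:] is the suffix after the current element
def pvOuterScan : List String → Bool
  | [] => false
  | p :: rest =>
      if p == "tests" then
        (if pvInnerScan rest then true else pvOuterScan rest)
      else pvOuterScan rest

def is_under_test_data_subtree_py (parts : List String) : Bool := pvOuterScan parts

-- ===== PORT B =====
-- B: one pass carrying a seen-'tests' flag
def pvAltGo : List String → Bool → Bool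
  | [], _ => false
  | p :: rest, seen =>
      if seen && (p == "data" || p == "assets") then true
      else pvAltGo rest (seen || p == "tests")

def is_under_test_data_subtree_py_alt (parts : List String) : Bool := pvAltGo parts false

-- ===== PRECONDITION & SPEC =====
def Spec_is_under_test_data_subtree_py (parts : List String) (out : Bool) : Prop := out = is_under_test_data_subtree_py_alt parts
instance (parts : List String) (out : Bool) : Decidable (Spec_is_under_test_data_subtree_py parts out) := by unfold Spec_is_under_test_data_subtree_py; infer_instance

-- ===== CLAIM (what is proved, stated in full; the proofs are below) =====
def Claim_equal_is_under_test_data_subtree_py : Prop := ∀ (parts : List String), Dom_is_under_test_data_subtree_py parts → Spec_is_under_test_data_subtree_py parts (is_under_test_data_subtree_py parts)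

-- ===== LEMMAS AND PROOFS =====

-- ===== VERDICT (by name: the statement is the Claim_ definition above) =====
theorem pvAltGo_true (l : List String) : pvAltGo l true = pvInnerScan l := by
  induction l with
  | nil => rfl
  | cons p rest ih => simp [pvAltGo, pvInnerScan, ih]

theorem pvOuterScan_false_of_inner (l : List String) (h : pvInnerScan l = false) :
    pvOuterScan l = false := by
  induction l with
  | nil => rfl
  | cons p rest ih =>
      simp [pvInnerScan] at h
      simp [pvOuterScan, pvInnerScan, h.2, ih h.2]

theorem pvOuter_eq_alt (l : List String) : pvOuterScan l = pvAltGo l false := by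
  induction l with
  | nil => rfl
  | cons p rest ih =>
      by_cases hp : p == "tests"
      · have h1 : (p == "data" || p == "assets") = false := by
          have := of_decide_eq_true hp
          subst this
          decide
        simp [pvOuterScan, pvAltGo, hp, h1, pvAltGo_true]
        cases hinner : pvInnerScan rest with
        | true => simp
        | false => simp [pvOuterScan_false_of_inner rest hinner]
      · simp [pvOuterScan, pvAltGo, hp, ih]

theorem is_under_test_data_subtree_py_spec : Claim_equal_is_under_test_data_subtree_py := by
  intro parts _
  unfold Spec_is_under_test_data_subtree_py is_under_test_data_subtree_py is_under_test_data_subtree_py_alt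
  exact pvOuter_eq_alt parts
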